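-- pv_equiv track=rewrite | github.com/mithalikp25/hackathon-phishing-detector | feature_extraction.py | _max_consecutive_consonants
-- ===== SOURCE A (Python) =====
-- def _max_consecutive_consonants(text):
--     """Find maximum consecutive consonants in text"""
--     consonants = 'bcdfghjklmnpqrstvwxyz'
--     max_count = 0
--     current_count = 0
--
--     for char in text.lower():
--         if char in consonants:
--             current_count += 1
--             max_count = max(max_count, current_count)
--         else:
--             current_count = 0
--
--     return max_count
-- ===== SOURCE B (Python) =====
-- def _max_consecutive_consonants(text):
--     """Find maximum consecutive consonants in text (run-enumeration version)."""
--     consonants = 'bcdfghjklmnpqrstvwxyz'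
--     s = text.lower()
--     n = len(s)
--     best = 0
--     i = 0
--     while i < n:
--         if s[i] in consonants:
--             j = i
--             while j < n and s[j] in consonants:
--                 j += 1
--             if j - i > best:
--                 best = j - i
--             i = j
--         else:
--             i += 1
--     return best
-- ===== Notes on version B (the rewrite author's own statement) =====
-- stated objective: alternative
-- what changed: B enumerates maximal consonant runs with a two-pointer inner scan and keeps the best run length, instead of A's per-character running counter reset on non-consonants.
import Mathlib
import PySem

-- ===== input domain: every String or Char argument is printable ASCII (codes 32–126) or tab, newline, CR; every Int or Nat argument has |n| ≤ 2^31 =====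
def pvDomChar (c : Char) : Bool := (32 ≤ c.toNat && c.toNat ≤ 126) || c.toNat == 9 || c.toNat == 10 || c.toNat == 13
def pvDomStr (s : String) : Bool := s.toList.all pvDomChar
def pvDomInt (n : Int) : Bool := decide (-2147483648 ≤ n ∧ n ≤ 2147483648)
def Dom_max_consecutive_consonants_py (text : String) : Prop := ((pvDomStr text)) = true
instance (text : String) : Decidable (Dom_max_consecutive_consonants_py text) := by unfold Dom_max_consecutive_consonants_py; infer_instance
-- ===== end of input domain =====

-- B replaces A's per-character running counter by a two-pointer enumeration of maximal
-- consonant runs; same O(n) cost, proved to return the same value on every string.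

-- shared helper: 'char in consonants' membership test
def pvIsCons (c : Char) : Bool := "bcdfghjklmnpqrstvwxyz".toList.contains c

-- ===== PORT A =====
-- for char in text.lower(): running (max_count, current_count) state
def pvAStep (st : Int × Int) (ch : Char) : Int × Int :=
  if pvIsCons ch then (max st.1 (st.2 + 1), st.2 + 1) else (st.1, 0)

def max_consecutive_consonants_py (text : String) : Int :=
  ((PySem.Str.lower text).toList.foldl pvAStep (0, 0)).1

-- ===== PORT B =====
-- outer while: advance over the list; on a consonant the inner while (takeWhile/dropWhile
-- over the same predicate) scans the whole run and jumps i to its end (i = j)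
def pvBRun : List Char → Int
  | [] => 0
  | c :: t =>
      if pvIsCons c then
        max ((((c :: t).takeWhile pvIsCons).length : Int)) (pvBRun ((c :: t).dropWhile pvIsCons))
      else pvBRun t
termination_by l => l.length
decreasing_by
  · simp only [List.dropWhile, *]
    simp only [List.length_cons]
    exact Nat.lt_succ_of_le (List.length_dropWhile_le pvIsCons t)
  · simp

def max_consecutive_consonants_py_alt (text : String) : Int :=
  pvBRun (PySem.Str.lower text).toList

-- ===== PRECONDITION & SPEC =====
def Spec_max_consecutive_consonants_py (text : String) (out : Int) : Prop := out = max_consecutive_consonants_py_alt text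
instance (text : String) (out : Int) : Decidable (Spec_max_consecutive_consonants_py text out) := by unfold Spec_max_consecutive_consonants_py; infer_instance

-- ===== CLAIM (what is proved, stated in full; the proofs are below) =====
def Claim_equal_max_consecutive_consonants_py : Prop := ∀ (text : String), Dom_max_consecutive_consonants_py text → Spec_max_consecutive_consonants_py text (max_consecutive_consonants_py text)

-- ===== LEMMAS AND PROOFS =====

-- h c l: the best "run length ending inside l" when a consonant run of length c is open on entry
def pvH (c : Int) : List Char → Int
  | [] => 0
  | ch :: t => if pvIsCons ch then max (c + 1) (pvH (c + 1) t) else pvH 0 t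

lemma pvBRun_nonneg (l : List Char) : 0 ≤ pvBRun l := by
  induction l using pvBRun.induct with
  | case1 => rw [pvBRun.eq_def]
  | case2 c t hc ih => rw [pvBRun.eq_def]; simp [hc]; left; positivity
  | case3 c t hc ih => rw [pvBRun.eq_def]; simp [hc]; exact ih

lemma pvH_eq (l : List Char) : ∀ c : Int, 0 ≤ c →
    pvH c l = if ((l.takeWhile pvIsCons).length = 0) then pvBRun l
              else max (c + ((l.takeWhile pvIsCons).length : Int)) (pvBRun (l.dropWhile pvIsCons)) := by
  induction l with
  | nil => intro c _; rw [pvBRun.eq_def]; simp [pvH]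
  | cons ch t ih =>
    intro c hc
    by_cases hch : pvIsCons ch
    · have ht := ih (c + 1) (by omega)
      rw [pvH]
      simp only [hch, if_true, List.takeWhile_cons_of_pos hch, List.dropWhile_cons_of_pos hch,
        List.length_cons, Nat.succ_ne_zero, if_false]
      by_cases h0 : (t.takeWhile pvIsCons).length = 0
      · rw [ht, if_pos h0]
        have hd : t.dropWhile pvIsCons = t := by
          cases t with
          | nil => rfl
          | cons x xs =>
            simp only [List.takeWhile] at h0
            cases hx : pvIsCons x with
            | true => simp [hx] at h0
            | false => simp [List.dropWhile, hx]
        rw [hd, h0]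
        push_cast
        omega
      · rw [ht, if_neg h0]
        push_cast
        omega
    · rw [pvH]
      simp only [hch, Bool.false_eq_true, if_false, List.takeWhile_cons_of_neg hch,
        List.length_nil, if_pos]
      conv_rhs => rw [pvBRun.eq_def]
      simp only [hch, Bool.false_eq_true, if_false]
      by_cases h0 : (t.takeWhile pvIsCons).length = 0
      · rw [ih 0 le_rfl, if_pos h0]
      · rw [ih 0 le_rfl, if_neg h0]
        cases t with
        | nil => simp at h0
        | cons x xs =>
          cases hx : pvIsCons x with
          | false => rw [List.takeWhile_cons_of_neg (by simp [hx])] at h0; simp at h0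
          | true =>
            conv_rhs => rw [pvBRun.eq_def]
            simp only [hx, if_true]
            omega

lemma pvH_zero (l : List Char) : pvH 0 l = pvBRun l := by
  rw [pvH_eq l 0 le_rfl]
  by_cases h0 : (l.takeWhile pvIsCons).length = 0
  · rw [if_pos h0]
  · rw [if_neg h0]
    cases l with
    | nil => simp [List.takeWhile] at h0
    | cons ch t =>
      cases hch : pvIsCons ch with
      | false => simp [List.takeWhile_cons_of_neg, hch] at h0
      | true =>
        conv_rhs => rw [pvBRun.eq_def]
        simp [hch]

lemma pvFold_fst (l : List Char) : ∀ (m c : Int), 0 ≤ m →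
    (l.foldl pvAStep (m, c)).1 = max m (pvH c l) := by
  induction l with
  | nil => intro m c hm; simp [pvH]; omega
  | cons ch t ih =>
    intro m c hm
    by_cases hch : pvIsCons ch
    · simp only [List.foldl_cons, pvAStep, hch, if_true, pvH]
      rw [ih (max m (c + 1)) (c + 1) (by omega)]
      omega
    · simp only [List.foldl_cons, pvAStep, hch, Bool.false_eq_true, if_false, pvH]
      exact ih m 0 hm

-- ===== VERDICT (by name: the statement is the Claim_ definition above) =====
theorem max_consecutive_consonants_py_spec : Claim_equal_max_consecutive_consonants_py := by
  intro text _
  unfold Spec_max_consecutive_consonants_py max_consecutive_consonants_py max_consecutive_consonants_py_alt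
  rw [pvFold_fst _ 0 0 le_rfl, pvH_zero]
  have := pvBRun_nonneg (PySem.Str.lower text).toList
  omega
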